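-- pv_equiv track=rewrite | github.com/frederic-junier/DIU | bloc5/RechercheTextuelle/Brigitte/bloc5_TD_rechercheTextuelle_bibi.py | rechercheBSNbOp
-- ===== SOURCE A (Python) =====
-- def plusLongSuffixePrefixe(motif) :
--     """ renvoie une liste contenant l'indice du début du plus long suffixe qui est aussi préfixe dans le sous-motif qui
--     démarre à j+1. S'il n'y en a pas, on écrit 1. On interdit le mot entier. En particulier SP[m-1]=1"""
--     m = len(motif)
--     SP = [1]*m
--     for j in range(m-1) :      #boucle pour remplir SP de0 à m-2 car SP[m-1]=1
--         p = j+1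
--         while p <= m-1 and motif[p:] != motif[:m-p] :      #boucle sur p croissant car plus p est petit, plus le suffixe est long
--             p += 1
--         SP[j] = p
--     return SP                #pour que l'on retourne 1 dans le pire des cas du bonSuffixe
--
-- def bonSuffixe(motif):
--     """ renvoie un tableau où la valeur d'index j est j-k-1 lorsqu'il existe k correspondant
--     à la plus grande position dans le motif où M[j+1..m-1]=[k..m-j-1] et [j]!=M[k-1]
--     et lorsqu'il n'existe pas de k on met la valeur correspondante du plusLongSuffixePrefixe(motif) ! """
--     m = len(motif)
--     BS = plusLongSuffixePrefixe(motif)   #au pire on l'utilise...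
--     for j in range(m-1) :   #car BS[m-1]=1
--         k = j
--         while k >= 0 :
--             if motif[j+1:] == motif[k:k+m-j-1] and  (k==0 or motif[j] != motif[k-1]) :
--                 #k==0 or  pour éviter le k-1 = -1 < 0.   dans ce cas, il n'y a pas de lettre qui précède...
--                 BS[j] = j-k+1
--                 break
--             k -= 1
--     return BS
--
-- def rechercheBSNbOp(texte, motif) :
--     m = len(motif)
--     n = len(texte)
--     res = []
--     comp = 0
--     BS = bonSuffixe(motif)
--     #boucle pour faire glisser le motif sous le texte à partir de zéro an faisant attention de ne pas dépasser !
--     i = 0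
--     while i <= n-m :
--         j = m - 1             #on commene à la fin du motif !
--         while j >= 0 and texte[i+j] == motif[j] :   #on incrémente tant que c'est identique
--             j -= 1
--             comp += 1
--         if j == -1 :          #motif trouvé!!
--             res. append(i)
--             i += BS[0]
--         else :
--             i += BS[j]
--             comp += 1         #pour ne pas oublier de compter les échecs de comparaison (mismatch)
--     return "Motif trouvé en " + str(comp) + ' comparaisons, en position(s) : ' + str(res)
-- ===== SOURCE B (Python) =====
-- def rechercheBSNbOp(texte, motif):
--     m = len(motif)
--     n = len(texte)
--     # t[e] = length of the longest common suffix of motif[:e] and motif,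
--     # computed char-wise; one table replaces all of A's repeated slice scans.
--     t = []
--     for e in range(m + 1):
--         q = 0
--         while q < e and motif[e - 1 - q] == motif[m - 1 - q]:
--             q += 1
--         t.append(q)
--     BS = [1] * m
--     for j in range(m - 1):
--         L = m - 1 - j
--         e = -1
--         for x in range(m):          # last x with t[x] == L, i.e. the largest
--             if t[x] == L:
--                 e = x
--         if e >= 0:
--             BS[j] = m - e
--         else:
--             p = m
--             for x in range(m - 1, j, -1):   # smallest border start > j
--                 if t[m - x] == m - x:
--                     p = x
--             BS[j] = p
--     res = []
--     comp = 0
--     i = 0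
--     while i <= n - m:
--         q = 0
--         while q < m and texte[i + m - 1 - q] == motif[m - 1 - q]:
--             q += 1
--         comp += q
--         if q == m:
--             res.append(i)
--             i += BS[0]
--         else:
--             comp += 1
--             i += BS[m - 1 - q]
--     return "Motif trouvé en " + str(comp) + ' comparaisons, en position(s) : ' + str(res)
-- ===== Notes on version B (the rewrite author's own statement) =====
-- stated objective: faster
-- what changed: B replaces A's good-suffix preprocessing (for every j a scan over p resp. k that re-compares whole slices, O(m^3) character comparisons) by one char-wise common-suffix table t[e] computed once (O(m^2) worst case), from which both the strong good-suffix shift (last index e with t[e]=m-1-j) and the suffix-prefix fallback (t[m-p]=m-p) are read off; the Boyer-Moore search loop keeps A's exact comparison count and shift sequence.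
import Mathlib
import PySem

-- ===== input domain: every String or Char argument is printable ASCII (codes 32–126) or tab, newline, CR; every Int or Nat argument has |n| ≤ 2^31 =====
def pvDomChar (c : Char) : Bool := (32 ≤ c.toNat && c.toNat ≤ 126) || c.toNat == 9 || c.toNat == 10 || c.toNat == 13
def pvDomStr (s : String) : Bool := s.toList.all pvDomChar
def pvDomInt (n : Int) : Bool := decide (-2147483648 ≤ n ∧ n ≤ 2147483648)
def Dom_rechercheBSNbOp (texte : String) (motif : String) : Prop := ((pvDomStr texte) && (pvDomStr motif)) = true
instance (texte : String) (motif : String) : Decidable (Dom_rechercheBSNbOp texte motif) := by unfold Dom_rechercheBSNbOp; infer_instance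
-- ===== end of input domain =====

-- B replaces A's O(m^3) good-suffix preprocessing (repeated slice comparisons inside
-- two nested scans) by one char-wise common-suffix table t, from which both the strong
-- good-suffix shifts and the suffix-prefix fallback are read off; the search loop keeps
-- A's exact comparison count. Equivalence is about the return value; neither mutates input.

-- ===== PORT A =====
-- shared output formatting: "Motif trouvé en <comp> comparaisons, en position(s) : <res>"
def pvOut (comp : Int) (res : List Int) : String :=
  "Motif trouvé en " ++ PySem.Int.toStr comp ++ " comparaisons, en position(s) : " ++
  "[" ++ String.intercalate ", " (res.map PySem.Int.toStr) ++ "]"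

-- inner while of plusLongSuffixePrefixe: while p <= m-1 and motif[p:] != motif[:m-p]: p += 1
def pvSpWhile (cs : List Char) (m p : Int) : Int :=
  if _h : p ≤ m - 1 then
    if PySem.List.slice cs (some p) none ≠ PySem.List.slice cs (some 0) (some (m - p)) then
      pvSpWhile cs m (p + 1)
    else p
  else p
termination_by (m - p).toNat
decreasing_by omega

def pvPlusLong (cs : List Char) : List Int :=
  let m : Int := PySem.List.len cs
  (PySem.List.pyRange 0 (m - 1) 1).foldl
    (fun SP j => PySem.List.pySetD SP j (pvSpWhile cs m (j + 1)))
    (PySem.List.pyRepeat [1] m)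

-- the if-condition of bonSuffixe's inner while
def pvBsCond (cs : List Char) (m j k : Int) : Bool :=
  (PySem.List.slice cs (some (j + 1)) none == PySem.List.slice cs (some k) (some (k + m - j - 1)))
  && (k == 0 || (PySem.List.pyGetD cs j ' ' != PySem.List.pyGetD cs (k - 1) ' '))

-- inner while of bonSuffixe: while k >= 0: if cond: BS[j] = j-k+1; break; k -= 1
def pvBsWhile (cs : List Char) (m j k : Int) : Option Int :=
  if _h : 0 ≤ k then
    if pvBsCond cs m j k then some k else pvBsWhile cs m j (k - 1)
  else none
termination_by (k + 1).toNat
decreasing_by omega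

def pvBonSuffixe (cs : List Char) : List Int :=
  let m : Int := PySem.List.len cs
  (PySem.List.pyRange 0 (m - 1) 1).foldl
    (fun BS j =>
      match pvBsWhile cs m j j with
      | some k => PySem.List.pySetD BS j (j - k + 1)
      | none => BS)
    (pvPlusLong cs)

-- search inner while: while j >= 0 and texte[i+j] == motif[j]: j -= 1; comp += 1
def pvInnerA (ts cs : List Char) (i j comp : Int) : Int × Int :=
  if _h : 0 ≤ j then
    if PySem.List.pyGet? ts (i + j) == PySem.List.pyGet? cs j then
      pvInnerA ts cs i (j - 1) (comp + 1)
    else (j, comp)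
  else (j, comp)
termination_by (j + 1).toNat
decreasing_by omega

-- search outer while (fuel n+1 only makes the loop total; every shift BS[j] ≥ 1)
def pvOuterA (ts cs : List Char) (BS : List Int) (n m : Int) :
    Nat → Int → Int → List Int → Int × List Int
  | 0, _, comp, res => (comp, res)
  | fuel + 1, i, comp, res =>
    if i ≤ n - m then
      let r := pvInnerA ts cs i (m - 1) comp
      if r.1 == -1 then
        pvOuterA ts cs BS n m fuel (i + PySem.List.pyGetD BS 0 1) r.2 (res ++ [i])
      else
        pvOuterA ts cs BS n m fuel (i + PySem.List.pyGetD BS r.1 1) (r.2 + 1) res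
    else (comp, res)

def rechercheBSNbOp (texte : String) (motif : String) : String :=
  let cs := motif.toList
  let ts := texte.toList
  let m : Int := PySem.List.len cs
  let n : Int := PySem.List.len ts
  let BS := pvBonSuffixe cs
  let r := pvOuterA ts cs BS n m (n + 1).toNat 0 0 []
  pvOut r.1 r.2

-- ===== PORT B =====
-- t-table inner while: q = 0; while q < e and motif[e-1-q] == motif[m-1-q]: q += 1
def pvTWhile (cs : List Char) (m e q : Int) : Int :=
  if _h : q < e then
    if PySem.List.pyGet? cs (e - 1 - q) == PySem.List.pyGet? cs (m - 1 - q) then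
      pvTWhile cs m e (q + 1)
    else q
  else q
termination_by (e - q).toNat
decreasing_by omega

-- t = [] ; for e in range(m+1): ... t.append(q)
def pvT (cs : List Char) : List Int :=
  let m : Int := PySem.List.len cs
  (PySem.List.pyRange 0 (m + 1) 1).foldl (fun acc e => acc ++ [pvTWhile cs m e 0]) []

-- body of B's table loop for one j < m-1
def pvBsB (t : List Int) (m j : Int) : Int :=
  let L := m - 1 - j
  let e := (PySem.List.pyRange 0 m 1).foldl
    (fun acc x => if PySem.List.pyGetD t x 0 == L then x else acc) (-1)
  if 0 ≤ e then m - e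
  else
    (PySem.List.pyRange (m - 1) j (-1)).foldl
      (fun acc x => if PySem.List.pyGetD t (m - x) 0 == m - x then x else acc) m

def pvBSB (cs : List Char) : List Int :=
  let m : Int := PySem.List.len cs
  let t := pvT cs
  (PySem.List.pyRange 0 (m - 1) 1).foldl
    (fun BS j => PySem.List.pySetD BS j (pvBsB t m j))
    (PySem.List.pyRepeat [1] m)

-- search inner while of B: q = 0; while q < m and texte[i+m-1-q] == motif[m-1-q]: q += 1
def pvQWhile (ts cs : List Char) (m i q : Int) : Int :=
  if _h : q < m then
    if PySem.List.pyGet? ts (i + m - 1 - q) == PySem.List.pyGet? cs (m - 1 - q) then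
      pvQWhile ts cs m i (q + 1)
    else q
  else q
termination_by (m - q).toNat
decreasing_by omega

def pvOuterB (ts cs : List Char) (BS : List Int) (n m : Int) :
    Nat → Int → Int → List Int → Int × List Int
  | 0, _, comp, res => (comp, res)
  | fuel + 1, i, comp, res =>
    if i ≤ n - m then
      let q := pvQWhile ts cs m i 0
      if q == m then
        pvOuterB ts cs BS n m fuel (i + PySem.List.pyGetD BS 0 1) (comp + q) (res ++ [i])
      else
        pvOuterB ts cs BS n m fuel (i + PySem.List.pyGetD BS (m - 1 - q) 1) (comp + q + 1) res
    else (comp, res)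

def rechercheBSNbOp_alt (texte : String) (motif : String) : String :=
  let cs := motif.toList
  let ts := texte.toList
  let m : Int := PySem.List.len cs
  let n : Int := PySem.List.len ts
  let BS := pvBSB cs
  let r := pvOuterB ts cs BS n m (n + 1).toNat 0 0 []
  pvOut r.1 r.2

-- ===== PRECONDITION & SPEC =====
-- Pre_ excludes only the empty motif, on which the Python A raises IndexError (BS[0] of []).
def Pre_rechercheBSNbOp (texte : String) (motif : String) : Prop := motif ≠ ""
instance (texte : String) (motif : String) : Decidable (Pre_rechercheBSNbOp texte motif) := by
  unfold Pre_rechercheBSNbOp; infer_instance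

def pvWitness_rechercheBSNbOp : String × String := ("abcabcab", "cab")

def Spec_rechercheBSNbOp (texte : String) (motif : String) (out : String) : Prop := out = rechercheBSNbOp_alt texte motif
instance (texte : String) (motif : String) (out : String) : Decidable (Spec_rechercheBSNbOp texte motif out) := by unfold Spec_rechercheBSNbOp; infer_instance

-- ===== CLAIM (what is proved, stated in full; the proofs are below) =====
def Claim_equal_rechercheBSNbOp : Prop := ∀ (texte : String) (motif : String), Dom_rechercheBSNbOp texte motif → Pre_rechercheBSNbOp texte motif → Spec_rechercheBSNbOp texte motif (rechercheBSNbOp texte motif)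


-- ===== LEMMAS AND PROOFS =====

-- ---- the t-while loop (B's char-wise common-suffix scan): specification ----
theorem pv_tWhile_spec (cs : List Char) (m e : Int) (q : Int) :
    q ≤ pvTWhile cs m e q ∧ (q ≤ e → pvTWhile cs m e q ≤ e) ∧
    (∀ x, q ≤ x → x < pvTWhile cs m e q →
      (PySem.List.pyGet? cs (e - 1 - x) == PySem.List.pyGet? cs (m - 1 - x)) = true) ∧
    (pvTWhile cs m e q < e →
      (PySem.List.pyGet? cs (e - 1 - pvTWhile cs m e q) == PySem.List.pyGet? cs (m - 1 - pvTWhile cs m e q)) = false) := by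
  rw [pvTWhile]
  by_cases h : q < e
  · simp only [h, dif_pos]
    by_cases hc : (PySem.List.pyGet? cs (e - 1 - q) == PySem.List.pyGet? cs (m - 1 - q)) = true
    · simp only [hc, if_pos]
      obtain ⟨h1, h2, h3, h4⟩ := pv_tWhile_spec cs m e (q + 1)
      refine ⟨by omega, fun _ => h2 (by omega), ?_, h4⟩
      intro x hx hx2
      rcases eq_or_lt_of_le hx with rfl | hlt
      · exact hc
      · exact h3 x (by omega) hx2
    · simp only [hc, if_neg, Bool.not_eq_true] at *
      refine ⟨le_refl _, fun _ => le_of_lt h, ?_, fun _ => hc⟩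
      intro x hx hx2; omega
  · simp only [h, dite_false]
    refine ⟨le_refl _, fun h2 => h2, fun x hx hx2 => absurd hx2 (by omega), fun h2 => h2.elim⟩
termination_by (e - q).toNat
decreasing_by omega

-- tval e = L is equivalent to: all L rightmost chars match, and (if the block is longer) the next one fails
theorem pv_tval_eq_iff (cs : List Char) (m e L : Int) (h0 : 0 ≤ L) (hLe : L ≤ e) :
    pvTWhile cs m e 0 = L ↔
      ((∀ x, 0 ≤ x → x < L → (PySem.List.pyGet? cs (e - 1 - x) == PySem.List.pyGet? cs (m - 1 - x)) = true) ∧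
       (L < e → (PySem.List.pyGet? cs (e - 1 - L) == PySem.List.pyGet? cs (m - 1 - L)) = false)) := by
  obtain ⟨h1, h2, h3, h4⟩ := pv_tWhile_spec cs m e 0
  constructor
  · intro hr
    rw [hr] at h3 h4
    exact ⟨h3, h4⟩
  · rintro ⟨hall, hmis⟩
    set r := pvTWhile cs m e 0 with hrdef
    by_contra hne
    rcases lt_or_gt_of_ne hne with hlt | hgt
    · -- r < L : then r < e, mismatch at r, but hall says match at r
      have := h4 (by omega)
      have := hall r (by omega) (by omega)
      simp_all
    · -- r > L : then L < r so match at L by h3, but L < e so hmis gives mismatch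
      have h5 := h3 L (by omega) (by omega)
      have h6 := hmis (by omega)
      simp_all

-- ---- slice equality as a right-aligned char-wise condition ----
theorem pv_drop_eq_dropTake_iff (cs : List Char) (K L : Nat) (h : K + L ≤ cs.length) :
    (cs.drop (cs.length - L) = (cs.drop K).take L) ↔
      ∀ i : Nat, i < L → cs[K + L - 1 - i]? = cs[cs.length - 1 - i]? := by
  constructor
  · intro heq i hi
    have hc := congrArg (fun l => l[L - 1 - i]?) heq
    simp only [List.getElem?_drop, List.getElem?_take] at hc
    rw [if_pos (by omega)] at hc
    have e1 : cs.length - L + (L - 1 - i) = cs.length - 1 - i := by omega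
    have e2 : K + (L - 1 - i) = K + L - 1 - i := by omega
    rw [e1, e2] at hc
    exact hc.symm
  · intro hall
    apply List.ext_getElem?
    intro n
    simp only [List.getElem?_drop, List.getElem?_take]
    by_cases hn : n < L
    · rw [if_pos hn]
      have := hall (L - 1 - n) (by omega)
      have e1 : K + L - 1 - (L - 1 - n) = K + n := by omega
      have e2 : cs.length - 1 - (L - 1 - n) = cs.length - L + n := by omega
      rw [e1, e2] at this
      exact this.symm
    · rw [if_neg hn]
      apply List.getElem?_eq_none
      omega

-- the same, with Int indices matching the pyGet? form used by the while loops
theorem pv_cond_iff (cs : List Char) (m k L : Int) (hm : m = cs.length) (hk : 0 ≤ k)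
    (hL : 0 ≤ L) (he : k + L ≤ m) :
    (cs.drop (m - L).toNat = (cs.drop k.toNat).take L.toNat) ↔
      (∀ x : Int, 0 ≤ x → x < L →
        (PySem.List.pyGet? cs (k + L - 1 - x) == PySem.List.pyGet? cs (m - 1 - x)) = true) := by
  have hlen : k.toNat + L.toNat ≤ cs.length := by omega
  have hd : (m - L).toNat = cs.length - L.toNat := by omega
  rw [hd, pv_drop_eq_dropTake_iff cs k.toNat L.toNat hlen]
  constructor
  · intro hall x h0 hx
    have := hall x.toNat (by omega)
    rw [PySem.List.pyGet?_of_nonneg cs (show (0:Int) ≤ k + L - 1 - x by omega),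
        PySem.List.pyGet?_of_nonneg cs (show (0:Int) ≤ m - 1 - x by omega)]
    have e1 : (k + L - 1 - x).toNat = k.toNat + L.toNat - 1 - x.toNat := by omega
    have e2 : (m - 1 - x).toNat = cs.length - 1 - x.toNat := by omega
    rw [e1, e2, this]
    simp
  · intro hall i hi
    have := hall (i : Int) (by omega) (by omega)
    rw [PySem.List.pyGet?_of_nonneg cs (show (0:Int) ≤ k + L - 1 - (i:Int) by omega),
        PySem.List.pyGet?_of_nonneg cs (show (0:Int) ≤ m - 1 - (i:Int) by omega)] at this
    have e1 : ((k + L - 1 - (i:Int))).toNat = k.toNat + L.toNat - 1 - i := by omega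
    have e2 : ((m - 1 - (i:Int))).toNat = cs.length - 1 - i := by omega
    rw [e1, e2] at this
    simpa using this

-- A's suffix-prefix test at p equals B's t-table test at m-p
theorem pv_spCond_iff (cs : List Char) (m p : Int) (hm : m = cs.length) (h0 : 0 ≤ p) (hpm : p ≤ m) :
    (PySem.List.slice cs (some p) none = PySem.List.slice cs (some 0) (some (m - p))) ↔
      pvTWhile cs m (m - p) 0 = m - p := by
  have hL : (0:Int) ≤ m - p := by omega
  rw [PySem.List.slice_from cs h0, PySem.List.slice_zero_start, PySem.List.slice_to cs hL]
  have h1 := pv_cond_iff cs m 0 (m - p) hm (le_refl 0) hL (by omega)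
  simp only [zero_add, Int.toNat_zero, List.drop_zero] at h1
  have e1 : m - (m - p) = p := by ring
  rw [e1] at h1
  rw [h1, pv_tval_eq_iff cs m (m - p) (m - p) hL (le_refl _)]
  simp

-- A's strong good-suffix condition at (j,k) equals B's t-table test at k+(m-1-j)
theorem pv_strongCond_iff (cs : List Char) (m j k : Int) (hm : m = cs.length) (h0k : 0 ≤ k)
    (hkj : k ≤ j) (h0j : 0 ≤ j) (hjm : j ≤ m - 2) :
    pvBsCond cs m j k = true ↔ pvTWhile cs m (k + (m - 1 - j)) 0 = m - 1 - j := by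
  have hL : (0:Int) ≤ m - 1 - j := by omega
  have he : k + (m - 1 - j) ≤ m := by omega
  unfold pvBsCond
  rw [PySem.List.slice_from cs (show (0:Int) ≤ j + 1 by omega),
      PySem.List.slice_toNat cs h0k (show (0:Int) ≤ k + m - j - 1 by omega)]
  have e0 : (k + m - j - 1).toNat - k.toNat = (m - 1 - j).toNat := by omega
  rw [e0]
  have h1 := pv_cond_iff cs m k (m - 1 - j) hm h0k hL he
  have e1 : (m - (m - 1 - j)).toNat = (j + 1).toNat := by omega
  rw [e1] at h1
  rw [pv_tval_eq_iff cs m (k + (m - 1 - j)) (m - 1 - j) hL (by omega)]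
  simp only [Bool.and_eq_true, beq_iff_eq, Bool.or_eq_true, bne_iff_ne]
  rw [h1]
  have eidx : ∀ x : Int, k + (m - 1 - j) - 1 - x = k + (m - 1 - j) - 1 - x := fun _ => rfl
  constructor
  · rintro ⟨hsl, hex⟩
    refine ⟨fun x hx1 hx2 => ?_, fun hlt => ?_⟩
    · have := hsl x hx1 hx2
      simpa using this
    · -- L < e means 1 ≤ k
      have hk1 : 1 ≤ k := by omega
      rcases hex with hk0 | hne
      · exfalso; omega
      · have e2 : k + (m - 1 - j) - 1 - (m - 1 - j) = k - 1 := by ring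
        have e3 : m - 1 - (m - 1 - j) = j := by ring
        rw [e2, e3]
        rw [PySem.List.pyGet?_eq_some_getElem cs (show (0:Int) ≤ k - 1 by omega) (by omega),
            PySem.List.pyGet?_eq_some_getElem cs h0j (by omega)]
        rw [PySem.List.pyGetD_eq_getElem cs ' ' h0j (by omega),
            PySem.List.pyGetD_eq_getElem cs ' ' (show (0:Int) ≤ k - 1 by omega) (by omega)] at hne
        simp only [beq_eq_false_iff_ne, ne_eq, Option.some.injEq]
        exact fun hc => hne (hc.symm)
  · rintro ⟨hall, hmis⟩
    refine ⟨fun x hx1 hx2 => ?_, ?_⟩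
    · have := hall x hx1 hx2
      simpa using this
    · by_cases hk0 : k = 0
      · exact Or.inl hk0
      · right
        have hlt : m - 1 - j < k + (m - 1 - j) := by omega
        have := hmis hlt
        have e2 : k + (m - 1 - j) - 1 - (m - 1 - j) = k - 1 := by ring
        have e3 : m - 1 - (m - 1 - j) = j := by ring
        rw [e2, e3] at this
        rw [PySem.List.pyGet?_eq_some_getElem cs (show (0:Int) ≤ k - 1 by omega) (by omega),
            PySem.List.pyGet?_eq_some_getElem cs h0j (by omega)] at this
        rw [PySem.List.pyGetD_eq_getElem cs ' ' h0j (by omega),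
            PySem.List.pyGetD_eq_getElem cs ' ' (show (0:Int) ≤ k - 1 by omega) (by omega)]
        simp only [beq_eq_false_iff_ne, ne_eq, Option.some.injEq] at this
        exact fun hc => this (hc.symm)

-- ---- loop shapes ----
theorem pv_bsWhile_eq_find (cs : List Char) (m j k : Int) :
    pvBsWhile cs m j k = (PySem.List.pyRange k (-1) (-1)).find? (pvBsCond cs m j) := by
  rw [pvBsWhile]
  by_cases h : 0 ≤ k
  · rw [dif_pos h, PySem.List.pyRange_neg_one_cons (show (-1:Int) < k by omega), List.find?_cons]
    by_cases hc : pvBsCond cs m j k = true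
    · simp [hc]
    · simp only [Bool.not_eq_true] at hc
      simp only [hc, if_neg, Bool.false_eq_true, ite_false]
      exact pv_bsWhile_eq_find cs m j (k - 1)
  · rw [dif_neg h, PySem.List.pyRange_neg_one_eq_nil (by omega), List.find?_nil]
termination_by (k + 1).toNat
decreasing_by omega

theorem pv_spWhile_eq_find (cs : List Char) (m p : Int) (h0 : 0 ≤ p) (hpm : p ≤ m) :
    pvSpWhile cs m p =
      ((PySem.List.pyRange p m 1).find? (fun x =>
        PySem.List.slice cs (some x) none == PySem.List.slice cs (some 0) (some (m - x)))).getD m := by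
  rw [pvSpWhile]
  by_cases h : p ≤ m - 1
  · rw [dif_pos h, PySem.List.pyRange_one_cons (show p < m by omega), List.find?_cons]
    by_cases hc : PySem.List.slice cs (some p) none = PySem.List.slice cs (some 0) (some (m - p))
    · rw [if_neg (not_not_intro hc)]
      have hcb : (PySem.List.slice cs (some p) none == PySem.List.slice cs (some 0) (some (m - p))) = true := by
        simpa using hc
      rw [hcb]
      rfl
    · rw [if_pos hc]
      have hcb : (PySem.List.slice cs (some p) none == PySem.List.slice cs (some 0) (some (m - p))) = false := by
        simpa using hc
      rw [hcb]
      exact pv_spWhile_eq_find cs m (p + 1) (by omega) (by omega)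
  · rw [dif_neg h, PySem.List.pyRange_one_eq_nil (by omega), List.find?_nil]
    have : p = m := by omega
    simp [this]
termination_by (m - p).toNat
decreasing_by omega

-- 'last satisfying wins' fold = find? on the reversed list
theorem pv_lastpick (p : Int → Bool) (l : List Int) (a : Int) :
    l.foldl (fun acc x => if p x then x else acc) a = (l.reverse.find? p).getD a := by
  induction l generalizing a with
  | nil => simp
  | cons x l ih =>
    simp only [List.foldl_cons, List.reverse_cons, List.find?_append, ih]
    cases hf : l.reverse.find? p with
    | some y => simp [hf, Option.or]
    | none =>
      by_cases hx : p x = true <;> simp [hf, hx, Option.or, List.find?]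

theorem pv_reverse_pyRange_one (a b : Int) :
    (PySem.List.pyRange a b 1).reverse = PySem.List.pyRange (b - 1) (a - 1) (-1) := by
  by_cases h : b ≤ a
  · rw [PySem.List.pyRange_one_eq_nil h, PySem.List.pyRange_neg_one_eq_nil (by omega)]
    rfl
  · have hb : b = (b - 1) + 1 := by ring
    rw [hb, PySem.List.pyRange_one_succ_right (by omega), List.reverse_append,
        PySem.List.pyRange_neg_one_cons (by omega)]
    have ih := pv_reverse_pyRange_one a (b - 1)
    simp only [List.reverse_cons, List.reverse_nil, List.nil_append, List.cons_append,
      List.cons.injEq, List.singleton_append]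
    constructor
    · ring
    · rw [ih]
      norm_num
termination_by (b - a).toNat
decreasing_by omega

theorem pv_find?_congr (l : List Int) (p q : Int → Bool) (h : ∀ x ∈ l, p x = q x) :
    l.find? p = l.find? q := by
  induction l with
  | nil => rfl
  | cons x l ih =>
    simp only [List.find?_cons, h x (by simp)]
    split
    · rfl
    · exact ih fun y hy => h y (by simp [hy])

-- ---- B's t table lookups ----
theorem pv_t_get (cs : List Char) (x : Int) (h0 : 0 ≤ x) (hx : x ≤ (cs.length : Int)) :
    PySem.List.pyGetD (pvT cs) x 0 = pvTWhile cs (cs.length : Int) x 0 := by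
  unfold pvT
  simp only [PySem.List.len_eq, PySem.List.foldl_append_singleton_eq_map, List.nil_append]
  rw [PySem.List.pyGetD_map_pyRange_of_nonneg _ _ _ _ h0 (by omega)]

-- ---- per-position equality of the two shift tables ----
-- bridging fact: Bools equal when their truth conditions are
theorem pv_bool_eq (a b : Bool) (h : a = true ↔ b = true) : a = b := by
  cases a <;> cases b <;> simp_all

theorem pv_perj (cs : List Char) (m j : Int) (hm : m = cs.length) (h0 : 0 ≤ j) (hj : j ≤ m - 2) :
    (match pvBsWhile cs m j j with
     | some k => j - k + 1
     | none => pvSpWhile cs m (j + 1)) = pvBsB (pvT cs) m j := by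
  have hL0 : (0:Int) ≤ m - 1 - j := by omega
  unfold pvBsB
  simp only []
  -- B's strong-rule scan = find? on the reversed index range
  rw [pv_lastpick, pv_lastpick]
  -- replace t-table lookups by pvTWhile on the scanned ranges
  have ht1 : ((PySem.List.pyRange 0 m 1).reverse.find? fun x => PySem.List.pyGetD (pvT cs) x 0 == m - 1 - j)
      = (PySem.List.pyRange 0 m 1).reverse.find? fun x => pvTWhile cs m x 0 == m - 1 - j := by
    apply pv_find?_congr
    intro x hx
    rw [List.mem_reverse, PySem.List.mem_pyRange_one] at hx
    rw [pv_t_get cs x hx.1 (by omega), hm]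
  rw [ht1]
  -- split the scanned range at L = m-1-j; below L the t-test is always false
  have hsplit : PySem.List.pyRange 0 m 1
      = PySem.List.pyRange 0 (m - 1 - j) 1 ++ PySem.List.pyRange (m - 1 - j) m 1 :=
    PySem.List.pyRange_one_append 0 (m - 1 - j) m (by omega) (by omega)
  rw [hsplit, List.reverse_append, List.find?_append]
  have hlow : ((PySem.List.pyRange 0 (m - 1 - j) 1).reverse.find? fun x => pvTWhile cs m x 0 == m - 1 - j)
      = none := by
    rw [List.find?_eq_none]
    intro x hx
    rw [List.mem_reverse, PySem.List.mem_pyRange_one] at hx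
    have hle := (pv_tWhile_spec cs m x 0).2.1 hx.1
    simp only [beq_iff_eq]
    omega
  -- the upper part is A's k-scan shifted by L
  have hmap : PySem.List.pyRange (m - 1 - j) m 1
      = (PySem.List.pyRange 0 (j + 1) 1).map (fun k => (m - 1 - j) + k) := by
    rw [PySem.List.pyRange_one, PySem.List.pyRange_one, List.map_map]
    have : (m - (m - 1 - j)).toNat = (j + 1 - 0).toNat := by omega
    rw [this]
    apply List.map_congr_left
    intro k _
    simp
  have hup : ((PySem.List.pyRange (m - 1 - j) m 1).reverse.find? fun x => pvTWhile cs m x 0 == m - 1 - j)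
      = (pvBsWhile cs m j j).map (fun k => (m - 1 - j) + k) := by
    rw [hmap, ← List.map_reverse, List.find?_map, pv_reverse_pyRange_one]
    simp only [show (j:Int) + 1 - 1 = j by ring, show (0:Int) - 1 = -1 by ring]
    rw [pv_bsWhile_eq_find]
    refine congrArg _ ?_
    apply pv_find?_congr
    intro k hk
    have hkmem : 0 ≤ k ∧ k ≤ j := by
      rw [PySem.List.pyRange_neg_one] at hk
      simp only [List.mem_map, List.mem_range] at hk
      obtain ⟨a, ha1, ha2⟩ := hk
      omega
    apply pv_bool_eq
    simp only [Function.comp_apply, beq_iff_eq]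
    rw [show (m - 1 - j) + k = k + (m - 1 - j) by ring]
    exact (pv_strongCond_iff cs m j k hm hkmem.1 hkmem.2 h0 hj).symm
  rw [hlow, hup]
  cases hA : pvBsWhile cs m j j with
  | some k =>
    have hk0 : 0 ≤ k := by
      by_contra hneg
      rw [pv_bsWhile_eq_find] at hA
      have := List.mem_of_find?_eq_some hA
      rw [PySem.List.pyRange_neg_one] at this
      simp only [List.mem_map, List.mem_range] at this
      obtain ⟨a, _, ha⟩ := this
      omega
    simp only [Option.map_some, Option.or_none, Option.getD_some]
    rw [if_pos (by omega)]
    ring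
  | none =>
    simp only [Option.map_none, Option.or_none, Option.getD_none]
    rw [if_neg (by omega)]
    -- suffix-prefix fallback: B's downward scan = A's upward while
    have hrev : (PySem.List.pyRange (m - 1) j (-1)).reverse = PySem.List.pyRange (j + 1) m 1 := by
      have h1 := pv_reverse_pyRange_one (j + 1) m
      rw [show (j:Int) + 1 - 1 = j by ring] at h1
      rw [← h1, List.reverse_reverse]
    rw [hrev, pv_spWhile_eq_find cs m (j + 1) (by omega) (by omega)]
    refine congrArg (fun o => Option.getD o m) ?_
    apply pv_find?_congr
    intro x hx
    rw [PySem.List.mem_pyRange_one] at hx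
    apply pv_bool_eq
    simp only [beq_iff_eq]
    rw [pv_t_get cs (m - x) (by omega) (by omega), ← hm]
    exact pv_spCond_iff cs m x hm (by omega) (by omega)

-- ---- folds writing position-determined values into a table ----
theorem pv_setfold_len (P : Int → Bool) (g : Int → Int) (l : List Int) (init : List Int) :
    (l.foldl (fun acc j => if P j then PySem.List.pySetD acc j (g j) else acc) init).length = init.length := by
  induction l generalizing init with
  | nil => rfl
  | cons x l ih =>
    simp only [List.foldl_cons]
    rw [ih]
    split
    · exact PySem.List.length_pySetD init x (g x)
    · rfl

theorem pv_setfold_getElem? (c : Nat) (P : Int → Bool) (g : Int → Int) (init : List Int) (idx : Nat) :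
    ((PySem.List.pyRange 0 (c : Int) 1).foldl
        (fun acc j => if P j then PySem.List.pySetD acc j (g j) else acc) init)[idx]? =
      if (idx : Nat) < c ∧ P (idx : Int) = true ∧ idx < init.length then some (g (idx : Int))
      else init[idx]? := by
  induction c with
  | zero =>
    rw [show ((0:Nat):Int) = 0 by rfl, PySem.List.pyRange_one_eq_nil (le_refl 0)]
    simp
  | succ c ih =>
    have hc : ((c+1:Nat):Int) = (c:Int) + 1 := by push_cast; ring
    rw [hc, PySem.List.pyRange_one_succ_right (by positivity), List.foldl_append]
    simp only [List.foldl_cons, List.foldl_nil]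
    have hlen := pv_setfold_len P g (PySem.List.pyRange 0 (c:Int) 1) init
    set F := (PySem.List.pyRange 0 (c : Int) 1).foldl
        (fun acc j => if P j then PySem.List.pySetD acc j (g j) else acc) init with hF
    by_cases hp : P (c : Int) = true
    · rw [if_pos hp, PySem.List.pySetD_natCast, List.getElem?_set]
      by_cases he : c = idx
      · subst he
        rw [if_pos rfl]
        by_cases hl : c < F.length
        · rw [if_pos hl, if_pos ⟨by omega, hp, by omega⟩]
        · rw [if_neg hl, if_neg (fun hcon => absurd hcon.2.2 (by omega))]
          exact (List.getElem?_eq_none (by omega)).symm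
      · rw [if_neg he, ih]
        by_cases h1 : idx < c ∧ P (idx:Int) = true ∧ idx < init.length
        · rw [if_pos h1, if_pos ⟨by omega, h1.2.1, h1.2.2⟩]
        · rw [if_neg h1, if_neg (fun hcon => h1 ⟨by have := hcon.1; omega, hcon.2.1, hcon.2.2⟩)]
    · rw [if_neg hp, ih]
      by_cases h1 : idx < c ∧ P (idx:Int) = true ∧ idx < init.length
      · rw [if_pos h1, if_pos ⟨by omega, h1.2.1, h1.2.2⟩]
      · rw [if_neg h1, if_neg (fun hcon => ?_)]
        rcases Nat.lt_succ_iff_lt_or_eq.mp hcon.1 with hlt | heq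
        · exact h1 ⟨hlt, hcon.2.1, hcon.2.2⟩
        · exact hp (heq ▸ hcon.2.1)

theorem pv_tables (cs : List Char) : pvBonSuffixe cs = pvBSB cs := by
  by_cases hcs : cs = []
  · subst hcs; rfl
  have hlen1 : 1 ≤ cs.length := by
    cases cs with
    | nil => exact absurd rfl hcs
    | cons x l => simp
  unfold pvBonSuffixe pvBSB pvPlusLong
  simp only [PySem.List.len_eq]
  have hM1 : (cs.length : Int) - 1 = ((cs.length - 1 : Nat) : Int) := by omega
  -- put the three table-writing folds into a common shape
  have hfA : (fun (BS : List Int) (j : Int) =>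
        match pvBsWhile cs (cs.length : Int) j j with
        | some k => PySem.List.pySetD BS j (j - k + 1)
        | none => BS)
      = fun BS j => if (pvBsWhile cs (cs.length : Int) j j).isSome then
          PySem.List.pySetD BS j (j - (pvBsWhile cs (cs.length : Int) j j).getD 0 + 1) else BS := by
    funext BS j
    cases h : pvBsWhile cs (cs.length : Int) j j <;> simp [h]
  have hfSP : (fun (SP : List Int) (j : Int) =>
        PySem.List.pySetD SP j (pvSpWhile cs (cs.length : Int) (j + 1)))
      = fun SP j => if (fun _ : Int => true) j then
          PySem.List.pySetD SP j (pvSpWhile cs (cs.length : Int) (j + 1)) else SP := by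
    funext SP j; simp
  have hfB : (fun (BS : List Int) (j : Int) =>
        PySem.List.pySetD BS j (pvBsB (pvT cs) (cs.length : Int) j))
      = fun BS j => if (fun _ : Int => true) j then
          PySem.List.pySetD BS j (pvBsB (pvT cs) (cs.length : Int) j) else BS := by
    funext BS j; simp
  rw [hfA, hfSP, hfB, PySem.List.pyRepeat_singleton, hM1]
  have hrep : (List.replicate ((cs.length : Int)).toNat (1 : Int)).length = cs.length := by simp
  have hlenSP : ((PySem.List.pyRange 0 ((cs.length - 1 : Nat) : Int) 1).foldl
      (fun SP j => if (fun _ : Int => true) j then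
          PySem.List.pySetD SP j (pvSpWhile cs (cs.length : Int) (j + 1)) else SP)
      (List.replicate ((cs.length : Int)).toNat 1)).length = cs.length := by
    rw [pv_setfold_len]; exact hrep
  apply List.ext_getElem?
  intro idx
  rw [pv_setfold_getElem?]
  by_cases hidx : idx < cs.length - 1
  · have hperj := pv_perj cs (cs.length : Int) (idx : Int) rfl (by omega) (by omega)
    by_cases hS : (pvBsWhile cs (cs.length : Int) (idx : Int) (idx : Int)).isSome = true
    · rw [if_pos ⟨hidx, hS, by rw [hlenSP]; omega⟩,
         pv_setfold_getElem?, if_pos ⟨hidx, rfl, by simp; omega⟩]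
      obtain ⟨k, hk⟩ := Option.isSome_iff_exists.mp hS
      rw [hk] at hperj
      rw [hk]
      simp only [Option.getD_some]
      exact congrArg some hperj
    · rw [if_neg (fun hcon => hS hcon.2.1),
         pv_setfold_getElem?, if_pos ⟨hidx, rfl, by simp; omega⟩,
         pv_setfold_getElem?, if_pos ⟨hidx, rfl, by simp; omega⟩]
      rw [Option.not_isSome_iff_eq_none] at hS
      rw [hS] at hperj
      exact congrArg some hperj
  · rw [if_neg (fun hcon => hidx hcon.1),
       pv_setfold_getElem?, if_neg (fun hcon => hidx hcon.1),
       pv_setfold_getElem?, if_neg (fun hcon => hidx hcon.1)]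

-- ---- the two search loops ----
theorem pv_inner_eq (ts cs : List Char) (m i : Int) (q c : Int) :
    pvInnerA ts cs i (m - 1 - q) c =
      (m - 1 - pvQWhile ts cs m i q, c + (pvQWhile ts cs m i q - q)) := by
  rw [pvInnerA, pvQWhile]
  by_cases h : q < m
  · rw [dif_pos (show (0:Int) ≤ m - 1 - q by omega), dif_pos h]
    have eidx : i + (m - 1 - q) = i + m - 1 - q := by ring
    rw [eidx]
    by_cases hc : (PySem.List.pyGet? ts (i + m - 1 - q) == PySem.List.pyGet? cs (m - 1 - q)) = true
    · rw [if_pos hc, if_pos hc]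
      have e2 : m - 1 - q - 1 = m - 1 - (q + 1) := by ring
      rw [e2, pv_inner_eq ts cs m i (q + 1) (c + 1)]
      refine congrArg _ ?_
      ring
    · simp only [Bool.not_eq_true] at hc
      rw [hc]
      simp only [Bool.false_eq_true, if_false]
      refine congrArg _ ?_
      ring
  · rw [dif_neg (show ¬ (0:Int) ≤ m - 1 - q by omega), dif_neg h]
    refine congrArg _ ?_
    ring
termination_by (m - q).toNat
decreasing_by omega

theorem pv_outer_eq (ts cs : List Char) (BS : List Int) (n m : Int) (fuel : Nat) :
    ∀ (i comp : Int) (res : List Int),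
      pvOuterA ts cs BS n m fuel i comp res = pvOuterB ts cs BS n m fuel i comp res := by
  induction fuel with
  | zero => intro i comp res; rfl
  | succ fuel ih =>
    intro i comp res
    rw [pvOuterA, pvOuterB]
    by_cases h : i ≤ n - m
    · rw [if_pos h, if_pos h]
      have hinner : pvInnerA ts cs i (m - 1) comp
          = (m - 1 - pvQWhile ts cs m i 0, comp + (pvQWhile ts cs m i 0 - 0)) := by
        have hthis := pv_inner_eq ts cs m i 0 comp
        rwa [show m - 1 - 0 = m - 1 by ring] at hthis
      simp only [hinner]
      set q := pvQWhile ts cs m i 0 with hq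
      by_cases hqm : q = m
      · rw [show ((m - 1 - q, comp + (q - 0)).1 == (-1 : Int)) = true by
            simp only [beq_iff_eq]; omega,
           show (q == m) = true by simp [hqm]]
        simp only [if_true]
        rw [ih, show comp + (q - 0) = comp + q by ring]
      · rw [show ((m - 1 - q, comp + (q - 0)).1 == (-1 : Int)) = false by
            simp only [beq_eq_false_iff_ne, ne_eq]; omega,
           show (q == m) = false by simp [hqm]]
        simp only [Bool.false_eq_true, if_false]
        rw [ih, show comp + (q - 0) + 1 = comp + q + 1 by ring]
    · rw [if_neg h, if_neg h]

-- ===== VERDICT (by name: the statement is the Claim_ definition above) =====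
theorem rechercheBSNbOp_spec : Claim_equal_rechercheBSNbOp := by
  intro texte motif _ _
  unfold Spec_rechercheBSNbOp rechercheBSNbOp rechercheBSNbOp_alt
  simp only []
  rw [pv_tables, pv_outer_eq]
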